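-- pv_equiv track=rewrite | github.com/al3x030997/autoquery | autoquery/simulation/text_cleaner.py | _strip_footer
-- ===== SOURCE A (Python) =====
-- FOOTER_LINES = {
--     "member login",
--     "reset your password",
--     "faq + terms of use",
--     "faq + terms of service",
-- }
--
-- def _strip_footer(lines: list[str]) -> list[str]:
--     """Remove footer lines from the bottom."""
--     end = len(lines)
--
--     # Scan from bottom
--     for i in range(len(lines) - 1, -1, -1):
--         stripped = lines[i].strip().lower()
--         if not stripped:
--             end = i
--             continue
--         if stripped in FOOTER_LINES:
--             end = i
--             continue
--         if stripped.startswith("copyright ©") or "all rights reserved" in stripped: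
--             end = i
--             continue
--         # Hit real content, stop
--         break
--
--     return lines[:end]
-- ===== SOURCE B (Python) =====
-- FOOTER_LINES = {
--     "member login",
--     "reset your password",
--     "faq + terms of use",
--     "faq + terms of service",
-- }
--
--
-- def _is_footer(line: str) -> bool:
--     s = line.strip().lower()
--     return (not s) or s in FOOTER_LINES or s.startswith("copyright \u00a9") or "all rights reserved" in s
--
--
-- def _strip_footer(lines: list[str]) -> list[str]:
--     """Remove footer lines from the bottom."""
--     cut = 0
--     for i, line in enumerate(lines):
--         if not _is_footer(line):
--             cut = i + 1
--     return lines[:cut]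
-- ===== Notes on version B (the rewrite author's own statement) =====
-- stated objective: simpler
-- what changed: Replaces the bottom-up index scan with an early break by a factored-out is_footer predicate and a single forward enumerate pass that tracks the cut point after the last non-footer line, then slices once.
import Mathlib
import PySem

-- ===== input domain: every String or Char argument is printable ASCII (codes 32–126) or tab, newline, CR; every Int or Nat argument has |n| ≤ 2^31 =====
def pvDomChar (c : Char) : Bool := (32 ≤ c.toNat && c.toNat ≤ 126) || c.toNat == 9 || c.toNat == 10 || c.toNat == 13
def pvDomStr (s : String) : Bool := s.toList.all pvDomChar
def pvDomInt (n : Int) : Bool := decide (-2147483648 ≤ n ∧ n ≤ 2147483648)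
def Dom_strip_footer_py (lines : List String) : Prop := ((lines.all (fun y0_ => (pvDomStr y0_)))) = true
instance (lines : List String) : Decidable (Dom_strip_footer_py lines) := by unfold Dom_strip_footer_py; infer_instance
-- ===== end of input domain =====

-- B re-decomposes A: a factored-out footer predicate plus one forward enumerate pass tracking
-- the cut point after the last non-footer line, instead of A's bottom-up scan with early break
-- (objective: simpler). Return values are proved equal on the whole domain.

-- ===== PORT A =====
-- module constant FOOTER_LINES (a Python set)
def FOOTER_LINES : PySem.Set String :=
  PySem.Set.ofList ["member login", "reset your password", "faq + terms of use", "faq + terms of service"]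

-- the 'for i in range(len(lines)-1, -1, -1)' loop with state `end`; i counts down, break returns `end`
def stripLoopA (lines : List String) (i : Nat) (endv : Nat) : Nat :=
  let stripped := PySem.Str.lower (PySem.Str.strip (PySem.List.pyGetD lines (i : Int) ""))
  if stripped = "" then
    (if i = 0 then i else stripLoopA lines (i - 1) i)
  else if PySem.Set.contains FOOTER_LINES stripped then
    (if i = 0 then i else stripLoopA lines (i - 1) i)
  else if PySem.Str.startswith stripped "copyright ©" || PySem.Str.isIn "all rights reserved" stripped then
    (if i = 0 then i else stripLoopA lines (i - 1) i)
  else endv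

def strip_footer_py (lines : List String) : List String :=
  let endv := lines.length
  let endv := if lines.length = 0 then endv else stripLoopA lines (lines.length - 1) endv
  PySem.List.slice lines none (some (endv : Int))

-- ===== PORT B =====
def is_footer (line : String) : Bool :=
  let s := PySem.Str.lower (PySem.Str.strip line)
  decide (s = "") || PySem.Set.contains FOOTER_LINES s
    || (PySem.Str.startswith s "copyright ©" || PySem.Str.isIn "all rights reserved" s)

def strip_footer_py_alt (lines : List String) : List String :=
  let cut : Int :=
    (PySem.List.enumerate lines 0).foldl (fun cut p => if !is_footer p.2 then p.1 + 1 else cut) 0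
  PySem.List.slice lines none (some cut)

-- ===== PRECONDITION & SPEC =====
def Spec_strip_footer_py (lines : List String) (out : List String) : Prop := out = strip_footer_py_alt lines
instance (lines : List String) (out : List String) : Decidable (Spec_strip_footer_py lines out) := by unfold Spec_strip_footer_py; infer_instance

-- ===== CLAIM (what is proved, stated in full; the proofs are below) =====
def Claim_equal_strip_footer_py : Prop := ∀ (lines : List String), Dom_strip_footer_py lines → Spec_strip_footer_py lines (strip_footer_py lines)

-- ===== LEMMAS AND PROOFS =====

-- 1 + index of the last non-footer line of xs (0 if none): the common characterisation
def keepLen : List String → Nat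
  | [] => 0
  | x :: xs => if keepLen xs = 0 ∧ is_footer x then 0 else keepLen xs + 1

theorem keepLen_append_singleton (xs : List String) (x : String) :
    keepLen (xs ++ [x]) = if is_footer x then keepLen xs else xs.length + 1 := by
  induction xs with
  | nil => by_cases h : is_footer x <;> simp [keepLen, h]
  | cons y ys ih =>
    by_cases h : is_footer x <;> simp [keepLen, ih, h]

-- an if-chain with a shared branch body collapses to one disjunction
theorem if_chain {α : Type} (p : Prop) [Decidable p] (b2 b3 : Bool) (X Y : α) :
    (if p then X else if b2 then X else if b3 then X else Y)
      = if (decide p || b2 || b3) then X else Y := by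
  by_cases h : p <;> cases b2 <;> cases b3 <;> simp [h]

-- A's inline branch chain is exactly the is_footer predicate
theorem stripLoopA_eq (lines : List String) (i : Nat) (endv : Nat) :
    stripLoopA lines i endv =
      if is_footer (PySem.List.pyGetD lines (i : Int) "") then
        (if i = 0 then i else stripLoopA lines (i - 1) i)
      else endv := by
  rw [stripLoopA]
  exact if_chain _ _ _ _ _

-- A's loop with the invariant endv = i + 1 computes keepLen of the processed prefix
theorem stripLoopA_keepLen (lines : List String) (i : Nat) (h : i < lines.length) :
    stripLoopA lines i (i + 1) = keepLen (lines.take (i + 1)) := by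
  induction i using Nat.strong_induction_on with
  | _ i ih =>
    rw [stripLoopA_eq]
    have hget : PySem.List.pyGetD lines (i : Int) "" = lines[i] := by
      simp [PySem.List.pyGetD_natCast, List.getD_eq_getElem?_getD, List.getElem?_eq_getElem h]
    have htake : lines.take (i + 1) = lines.take i ++ [lines[i]] := by
      rw [List.take_add_one, List.getElem?_eq_getElem h]; rfl
    rw [hget, htake, keepLen_append_singleton]
    by_cases hf : is_footer lines[i]
    · simp only [hf, if_true]
      rcases Nat.eq_zero_or_pos i with hi | hi
      · subst hi; simp [keepLen]
      · have hne : i ≠ 0 := Nat.pos_iff_ne_zero.mp hi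
        rw [if_neg hne]
        have := ih (i - 1) (by omega) (by omega)
        rwa [Nat.sub_add_cancel hi] at this
    · simp [hf, List.length_take, Nat.min_eq_left (Nat.le_of_lt h)]

-- B's fold over enumerate computes keepLen
theorem foldl_enumerate_keepLen (xs : List String) (s c : Int) :
    (PySem.List.enumerate xs s).foldl (fun cut p => if !is_footer p.2 then p.1 + 1 else cut) c
      = if keepLen xs = 0 then c else s + keepLen xs := by
  induction xs generalizing s c with
  | nil => simp [PySem.List.enumerate_nil, keepLen]
  | cons y ys ih =>
    rw [PySem.List.enumerate_cons]
    simp only [List.foldl_cons, ih]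
    by_cases hf : is_footer y <;> by_cases h0 : keepLen ys = 0 <;>
      simp [keepLen, hf, h0] <;> omega

theorem strip_footer_eq_take (lines : List String) :
    strip_footer_py lines = lines.take (keepLen lines) := by
  rw [strip_footer_py]
  rcases Nat.eq_zero_or_pos lines.length with h0 | h0
  · have : lines = [] := List.length_eq_zero_iff.mp h0
    subst this
    have h := PySem.List.slice_to_natCast (xs := ([] : List String)) (b := 0)
    simp only [keepLen, Nat.cast_zero] at h ⊢
    simp [h]
  · have hne : lines.length ≠ 0 := by omega
    simp only [hne, ite_false]
    have := stripLoopA_keepLen lines (lines.length - 1) (by omega)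
    rw [Nat.sub_add_cancel h0] at this
    rw [this, List.take_length, PySem.List.slice_to_natCast]

theorem strip_footer_alt_eq_take (lines : List String) :
    strip_footer_py_alt lines = lines.take (keepLen lines) := by
  rw [strip_footer_py_alt]
  simp only [foldl_enumerate_keepLen, zero_add]
  by_cases h0 : keepLen lines = 0
  · have h := PySem.List.slice_to_natCast (xs := lines) (b := 0)
    simp only [Nat.cast_zero] at h
    simp [h0, h]
  · simp only [h0, ite_false]
    rw [PySem.List.slice_to_natCast]

-- ===== VERDICT (by name: the statement is the Claim_ definition above) =====
theorem strip_footer_py_spec : Claim_equal_strip_footer_py := by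
  intro lines _
  unfold Spec_strip_footer_py
  rw [strip_footer_eq_take, strip_footer_alt_eq_take]
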